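-- pv_equiv track=rewrite | github.com/JuhyunLee0271/BOJ | programmers/큰수만들기.py | solution
-- ===== SOURCE A (Python) =====
-- def solution(number, k):
--     stack = []
--     for i in range(len(number)):
--         while stack and stack[-1] < number[i] and k > 0:
--             stack.pop()
--             k -= 1
--         stack.append(number[i])
--
--     while k > 0:
--         stack.pop()
--         k -= 1
--
--     answer = ''.join(stack)
--     return answer
-- ===== SOURCE B (Python) =====
-- def solution(number, k):
--     m = len(number) - k
--     if m >= len(number):
--         return number
--     out = []
--     rest = number
--     while m > 0:
--         window = rest[:len(rest) - m + 1]
--         c = max(window)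
--         i = window.index(c)
--         out.append(c)
--         rest = rest[i + 1:]
--         m -= 1
--     return ''.join(out)
-- ===== Notes on version B (the rewrite author's own statement) =====
-- stated objective: alternative
-- what changed: Replaced the monotonic pop-stack over all digits by a windowed selection: pick each of the m = len(number)-k kept digits as the leftmost maximum of the feasible window of the remaining suffix.
import Mathlib
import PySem

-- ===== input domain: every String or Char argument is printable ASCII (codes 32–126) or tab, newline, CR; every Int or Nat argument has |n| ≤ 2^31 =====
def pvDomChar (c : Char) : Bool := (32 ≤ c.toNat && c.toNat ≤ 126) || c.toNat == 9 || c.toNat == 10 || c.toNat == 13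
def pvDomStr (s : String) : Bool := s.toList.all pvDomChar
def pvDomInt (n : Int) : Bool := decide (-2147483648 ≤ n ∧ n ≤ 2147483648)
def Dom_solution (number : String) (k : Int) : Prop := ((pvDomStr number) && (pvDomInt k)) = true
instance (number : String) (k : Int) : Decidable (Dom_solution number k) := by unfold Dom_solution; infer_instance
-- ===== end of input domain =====

-- B replaces A's monotonic pop-stack by repeated leftmost-max selection in a moving window; alternative decomposition, not claimed faster.


-- ===== PORT A =====
-- Python's stack is kept reversed here (head = stack[-1]); append = cons, pop = tail.
-- the inner 'while stack and stack[-1] < number[i] and k > 0'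
def whilePopA (stack : List Char) (c : Char) (k : Int) : List Char × Int :=
  match stack with
  | [] => ([], k)
  | t :: rest => if t < c ∧ k > 0 then whilePopA rest c (k - 1) else (t :: rest, k)

-- the 'for i in range(len(number))' loop over the characters
def runA : List Char → List Char → Int → List Char × Int
  | [], stack, k => (stack, k)
  | c :: cs, stack, k =>
      let p := whilePopA stack c k
      runA cs (c :: p.1) p.2

def solution (number : String) (k : Int) : String :=
  let p := runA number.toList [] k
  -- final 'while k > 0: stack.pop()', then ''.join(stack): drop k tops of the reversed stack, reverse back
  String.ofList ((p.1.drop p.2.toNat).reverse)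

-- ===== PORT B =====
-- the 'while m > 0' loop of Source B: window = rest[:len(rest)-m+1]; c = max(window); i = window.index(c)
def pickB : List Char → Nat → List Char
  | _, 0 => []
  | rest, m + 1 =>
      let window := rest.take (rest.length - m)
      match PySem.List.max? window (fun y => y) with
      | none => []                                   -- unreachable under Pre_ (window nonempty); totality guard only
      | some c =>
          let i := ((PySem.List.index? window c).getD 0)
          c :: pickB (rest.drop (i + 1)) m

def solution_alt (number : String) (k : Int) : String :=
  let n : Int := number.toList.length
  let m : Int := n - k
  if n ≤ m then number
  else String.ofList (pickB number.toList m.toNat)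

-- ===== PRECONDITION & SPEC =====
-- Pre_ excludes exactly k > len(number), where Python A raises IndexError (pop from empty stack).
def Pre_solution (number : String) (k : Int) : Prop := k ≤ (number.toList.length : Int)
instance (number : String) (k : Int) : Decidable (Pre_solution number k) := by unfold Pre_solution; infer_instance
def pvWitness_solution : String × Int := ("1924", 2)

def Spec_solution (number : String) (k : Int) (out : String) : Prop := out = solution_alt number k
instance (number : String) (k : Int) (out : String) : Decidable (Spec_solution number k out) := by unfold Spec_solution; infer_instance

-- ===== CLAIM (what is proved, stated in full; the proofs are below) =====
def Claim_equal_solution : Prop := ∀ (number : String) (k : Int), Dom_solution number k → Pre_solution number k → Spec_solution number k (solution number k)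

-- ===== LEMMAS AND PROOFS =====

-- A's answer on the character list
def ansA (xs : List Char) (k : Int) : List Char :=
  (((runA xs [] k).1.drop (runA xs [] k).2.toNat).reverse)

theorem solution_eq (number : String) (k : Int) :
    solution number k = String.ofList (ansA number.toList k) := rfl

-- ---- whilePopA facts ----
theorem wp_inv (s : List Char) (c : Char) (k : Int) :
    (whilePopA s c k).2 - (whilePopA s c k).1.length = k - s.length := by
  induction s generalizing k with
  | nil => simp [whilePopA]
  | cons t r ih =>
      simp only [whilePopA]
      split
      · have := ih (k - 1); push_cast [List.length_cons] at this ⊢; omega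
      · push_cast [List.length_cons]; omega

theorem wp_nonneg (s : List Char) (c : Char) (k : Int) (h : 0 ≤ k) :
    0 ≤ (whilePopA s c k).2 := by
  induction s generalizing k with
  | nil => simpa [whilePopA] using h
  | cons t r ih =>
      simp only [whilePopA]
      split
      · exact ih (k - 1) (by omega)
      · exact h

theorem wp_mem (s : List Char) (c : Char) (k : Int) (x : Char)
    (hx : x ∈ (whilePopA s c k).1) : x ∈ s := by
  induction s generalizing k with
  | nil => simp [whilePopA] at hx
  | cons t r ih =>
      simp only [whilePopA] at hx
      split at hx
      · exact List.mem_cons_of_mem _ (ih (k - 1) hx)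
      · exact hx

theorem wp_popall (s : List Char) (c : Char) (k : Int)
    (hlt : ∀ x ∈ s, x < c) (hk : (s.length : Int) ≤ k) :
    whilePopA s c k = ([], k - s.length) := by
  induction s generalizing k with
  | nil => simp [whilePopA]
  | cons t r ih =>
      have h0 : t < c := hlt t (by simp)
      have hl : (r.length : Int) ≤ k - 1 := by push_cast [List.length_cons] at hk ⊢; omega
      have hkpos : k > 0 := by push_cast [List.length_cons] at hk; omega
      simp only [whilePopA]
      rw [if_pos ⟨h0, hkpos⟩, ih (k - 1) (fun x hx => hlt x (List.mem_cons_of_mem _ hx)) hl]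
      congr 1
      push_cast [List.length_cons]
      omega

theorem wp_floor (s : List Char) (b c : Char) (k : Int)
    (h : ¬ b < c ∨ k ≤ (s.length : Int)) :
    whilePopA (s ++ [b]) c k = ((whilePopA s c k).1 ++ [b], (whilePopA s c k).2) := by
  induction s generalizing k with
  | nil =>
      simp only [List.nil_append, whilePopA]
      rw [if_neg]
      rintro ⟨h1, h2⟩
      rcases h with h | h
      · exact h h1
      · simp at h; omega
  | cons t r ih =>
      simp only [List.cons_append, whilePopA]
      split
      · apply ih
        rcases h with h | h
        · exact Or.inl h
        · right; push_cast [List.length_cons] at h ⊢; omega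
      · rfl

theorem wp_nopop (s : List Char) (c : Char) (k : Int) (h : k ≤ 0) :
    whilePopA s c k = (s, k) := by
  cases s with
  | nil => simp [whilePopA]
  | cons t r => simp only [whilePopA]; rw [if_neg]; rintro ⟨-, h2⟩; omega

-- ---- runA facts ----
theorem runA_append (p q : List Char) (s : List Char) (k : Int) :
    runA (p ++ q) s k = runA q (runA p s k).1 (runA p s k).2 := by
  induction p generalizing s k with
  | nil => simp [runA]
  | cons c cs ih => simp only [List.cons_append, runA]; exact ih _ _

theorem runA_inv (ys : List Char) (s : List Char) (k : Int) :
    (runA ys s k).2 - (runA ys s k).1.length = k - s.length - ys.length := by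
  induction ys generalizing s k with
  | nil => simp [runA]
  | cons c cs ih =>
      simp only [runA]
      have h1 := wp_inv s c k
      have h2 := ih (c :: (whilePopA s c k).1) (whilePopA s c k).2
      push_cast [List.length_cons] at h1 h2 ⊢
      omega

theorem runA_nonneg (ys : List Char) (s : List Char) (k : Int) (h : 0 ≤ k) :
    0 ≤ (runA ys s k).2 := by
  induction ys generalizing s k with
  | nil => simpa [runA] using h
  | cons c cs ih => simp only [runA]; exact ih _ _ (wp_nonneg s c k h)

theorem runA_mem (ys : List Char) (s : List Char) (k : Int) (x : Char)
    (hx : x ∈ (runA ys s k).1) : x ∈ ys ∨ x ∈ s := by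
  induction ys generalizing s k with
  | nil => right; simpa [runA] using hx
  | cons c cs ih =>
      simp only [runA] at hx
      rcases ih _ _ hx with h | h
      · exact Or.inl (List.mem_cons_of_mem _ h)
      · rcases List.mem_cons.1 h with h | h
        · exact Or.inl (by simp [h])
        · exact Or.inr (wp_mem s c k x h)

theorem runA_floor (ys : List Char) (s : List Char) (b : Char) (k : Int)
    (h : ∀ x ∈ ys.take (k - s.length).toNat, x ≤ b) :
    runA ys (s ++ [b]) k = ((runA ys s k).1 ++ [b], (runA ys s k).2) := by
  induction ys generalizing s k with
  | nil => simp [runA]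
  | cons c cs ih =>
      simp only [runA]
      have hc : ¬ b < c ∨ k ≤ (s.length : Int) := by
        by_cases hk : k ≤ (s.length : Int)
        · exact Or.inr hk
        · left
          have hmem : c ∈ (c :: cs).take (k - s.length).toNat := by
            have : (k - (s.length : Int)).toNat = ((k - s.length).toNat - 1) + 1 := by omega
            rw [this, List.take_succ_cons]
            exact List.mem_cons_self
          exact not_lt.2 (h c hmem)
      rw [wp_floor s b c k hc]
      have heq : (whilePopA s c k).2 - ((c :: (whilePopA s c k).1).length : Int)
          = k - s.length - 1 := by
        have := wp_inv s c k; push_cast [List.length_cons] at this ⊢; omega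
      have hrec := ih (c :: (whilePopA s c k).1) (whilePopA s c k).2 (by
        intro x hx
        rw [heq] at hx
        have hpos : 0 < k - (s.length : Int) := by
          by_contra hneg
          push Not at hneg
          have h0 : (k - (s.length : Int) - 1).toNat = 0 := by omega
          rw [h0] at hx; simp at hx
        have hdd : (k - (s.length : Int)).toNat = (k - (s.length : Int) - 1).toNat + 1 := by omega
        exact h x (by rw [hdd, List.take_succ_cons]; exact List.mem_cons_of_mem _ hx))
      simpa using hrec

theorem runA_nopop (ys : List Char) (s : List Char) (k : Int) (h : k ≤ 0) :
    runA ys s k = (ys.reverse ++ s, k) := by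
  induction ys generalizing s with
  | nil => simp [runA]
  | cons c cs ih => simp [runA, wp_nopop s c k h, ih (c :: s)]

-- ---- the key step: A's answer starts with the leftmost window maximum ----
theorem keyL (xs : List Char) (k : Int) (j : Nat) (b : Char)
    (hjk : (j : Int) ≤ k) (hkn : k < (xs.length : Int))
    (hsplit : xs = xs.take j ++ b :: xs.drop (j + 1))
    (hlt : ∀ x ∈ xs.take j, x < b)
    (hys : ∀ x ∈ (xs.drop (j + 1)).take (k - j).toNat, x ≤ b) :
    ansA xs k = b :: ansA (xs.drop (j + 1)) (k - j) := by
  have hjn : j < xs.length := by omega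
  set p := xs.take j with hp
  set ys := xs.drop (j + 1) with hy
  have hplen : p.length = j := by rw [hp, List.length_take]; omega
  have hylen : (ys.length : Int) = (xs.length : Int) - (j + 1) := by
    rw [hy, List.length_drop]; omega
  obtain ⟨sj, kj, hrun⟩ : ∃ a c, runA p [] k = (a, c) := ⟨_, _, rfl⟩
  have hmem : ∀ x ∈ sj, x < b := by
    intro x hx
    have hx' : x ∈ (runA p [] k).1 := by rw [hrun]; exact hx
    rcases runA_mem p [] k x hx' with h | h
    · exact hlt x h
    · simp at h
  have hkj : kj - sj.length = k - j := by
    have := runA_inv p [] k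
    rw [hrun] at this; simp [hplen] at this; omega
  have hkj_ge : (sj.length : Int) ≤ kj := by omega
  have hstep : runA xs [] k = runA ys [b] (k - j) := by
    conv_lhs => rw [hsplit]
    rw [runA_append, hrun]
    show runA ys (b :: (whilePopA sj b kj).1) (whilePopA sj b kj).2 = _
    rw [wp_popall sj b kj hmem hkj_ge]
    show runA ys [b] (kj - sj.length) = _
    rw [hkj]
  obtain ⟨s2, k2, hrun2⟩ : ∃ a c, runA ys [] (k - j) = (a, c) := ⟨_, _, rfl⟩
  have hfloor : runA ys [b] (k - j) = (s2 ++ [b], k2) := by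
    have hh : ∀ x ∈ ys.take (k - j - (([] : List Char).length : Int)).toNat, x ≤ b := by
      intro x hx
      apply hys x
      simpa using hx
    have := runA_floor ys [] b (k - j) hh
    rw [hrun2] at this
    simpa using this
  have hk2_nonneg : 0 ≤ k2 := by
    have := runA_nonneg ys [] (k - j) (by omega)
    rw [hrun2] at this; exact this
  have hk2_le : k2.toNat ≤ s2.length := by
    have := runA_inv ys [] (k - j)
    rw [hrun2] at this; simp at this
    omega
  have hA : runA xs [] k = (s2 ++ [b], k2) := by rw [hstep, hfloor]
  unfold ansA
  rw [hA, hrun2]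
  show ((s2 ++ [b]).drop k2.toNat).reverse = b :: (s2.drop k2.toNat).reverse
  rw [List.drop_append_of_le_length hk2_le]
  simp

-- ---- main induction: windowed selection computes A's answer ----
theorem mainT (m : Nat) : ∀ xs : List Char, m ≤ xs.length →
    pickB xs m = ansA xs ((xs.length : Int) - m) := by
  induction m with
  | zero =>
      intro xs _
      simp only [pickB]
      unfold ansA
      obtain ⟨s2, k2, hrun⟩ : ∃ a c, runA xs [] ((xs.length : Int) - (0 : Nat)) = (a, c) :=
        ⟨_, _, rfl⟩
      have hinv := runA_inv xs [] ((xs.length : Int) - (0 : Nat))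
      have hnn := runA_nonneg xs [] ((xs.length : Int) - (0 : Nat)) (by push_cast; omega)
      rw [hrun] at hinv hnn
      simp at hinv
      have hkk : k2.toNat = s2.length := by omega
      rw [hrun]
      show ([] : List Char) = (s2.drop k2.toNat).reverse
      rw [hkk, List.drop_length]
      rfl
  | succ m ih =>
      intro xs hm
      set n := xs.length with hnn
      set w := xs.take (n - m) with hw
      have hwlen : w.length = n - m := by rw [hw, List.length_take]; omega
      have hwne : w ≠ [] := by
        intro h; rw [h] at hwlen; simp at hwlen; omega
      obtain ⟨c, hc⟩ : ∃ c, PySem.List.max? w (fun y => y) = some c := by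
        cases hmax : PySem.List.max? w (fun y => y) with
        | none => rw [PySem.List.max?_eq_none_iff] at hmax; exact absurd hmax hwne
        | some c => exact ⟨c, rfl⟩
      have hcmem : c ∈ w := PySem.List.max?_mem hc
      have hcmax : ∀ y ∈ w, y ≤ c := by
        have := PySem.List.max?_isMax hc
        simpa using this
      obtain ⟨j, hj⟩ : ∃ j, PySem.List.index? w c = some j := by
        cases hidx : PySem.List.index? w c with
        | none => rw [PySem.List.index?_eq_none_iff] at hidx; exact absurd hcmem hidx
        | some j => exact ⟨j, rfl⟩
      have hj2 := hj
      rw [PySem.List.index?_eq_some_iff] at hj2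
      obtain ⟨pre, suf, hsp, hplen, hnotin⟩ := hj2
      have hjlt : j < w.length := by rw [hsp, ← hplen]; simp
      have hjnm : j < n - m := by rw [← hwlen]; exact hjlt
      have hslen : suf.length = n - m - j - 1 := by
        have : w.length = pre.length + 1 + suf.length := by rw [hsp]; simp; omega
        omega
      -- xs = pre ++ c :: (suf ++ tail)
      have hx2 : xs = pre ++ c :: (suf ++ xs.drop (n - m)) := by
        conv_lhs => rw [← List.take_append_drop (n - m) xs, ← hw, hsp]
        simp
      have htake : xs.take j = pre := by
        conv_lhs => rw [hx2, ← hplen]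
        exact List.take_left
      have hdrop : xs.drop (j + 1) = suf ++ xs.drop (n - m) := by
        conv_lhs => rw [hx2, ← hplen]
        rw [show pre.length + 1 = (pre ++ [c]).length by simp]
        rw [show pre ++ c :: (suf ++ xs.drop (n - m)) = (pre ++ [c]) ++ (suf ++ xs.drop (n - m)) by simp]
        exact List.drop_left
      have hsplit : xs = xs.take j ++ c :: xs.drop (j + 1) := by
        rw [htake, hdrop]; exact hx2
      -- unfold pickB one step
      have hpick : pickB xs (m + 1) = c :: pickB (xs.drop (j + 1)) m := by
        simp only [pickB]
        rw [← hnn, ← hw, hc]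
        show c :: pickB (xs.drop ((PySem.List.index? w c).getD 0 + 1)) m = _
        rw [hj]
        rfl
      rw [hpick]
      -- apply the key lemma
      set k : Int := (n : Int) - (m + 1) with hk
      have hkey := keyL xs k j c
        (by rw [hk]; omega)
        (by rw [hk, hnn]; omega)
        hsplit
        (by
          intro x hx
          rw [htake] at hx
          have hxw : x ∈ w := by rw [hsp]; exact List.mem_append_left _ hx
          have hne : x ≠ c := fun h => hnotin (h ▸ hx)
          exact lt_of_le_of_ne (hcmax x hxw) hne)
        (by
          intro x hx
          have hkj' : (k - j).toNat = suf.length := by rw [hslen, hk]; omega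
          rw [hkj', hdrop, List.take_left' rfl] at hx
          have hxw : x ∈ w := by
            rw [hsp]
            exact List.mem_append_right _ (List.mem_cons_of_mem _ hx)
          exact hcmax x hxw)
      have hkk : ((xs.length : Int) - (m + 1 : Nat)) = k := by rw [hk, hnn]; push_cast; ring
      rw [hkk, hkey]
      congr 1
      have hmle : m ≤ (xs.drop (j + 1)).length := by
        rw [List.length_drop]; omega
      rw [ih (xs.drop (j + 1)) hmle]
      congr 1
      rw [List.length_drop]
      have : j + 1 ≤ n := by omega
      omega

-- ===== VERDICT (by name: the statement is the Claim_ definition above) =====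
theorem solution_spec : Claim_equal_solution := by
  intro number k _ hpre
  unfold Spec_solution
  unfold Pre_solution at hpre
  rw [solution_eq]
  unfold solution_alt
  set xs := number.toList with hxs
  by_cases hk : k ≤ 0
  · rw [if_pos (by omega)]
    unfold ansA
    rw [runA_nopop xs [] k hk]
    simp [Int.toNat_of_nonpos hk, hxs]
  · rw [if_neg (by omega)]
    have hm : ((xs.length : Int) - k).toNat ≤ xs.length := by omega
    have := mainT ((xs.length : Int) - k).toNat xs hm
    rw [this]
    congr 2
    omega
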